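-- pv_equiv track=rewrite | github.com/arari123/sync-hub | app/core/document_summary.py | _document_type_prompt_guidance
-- ===== SOURCE A (Python) =====
-- from typing import Optional, Sequence, Tuple
--
-- DOC_TYPE_CATALOG = "catalog"
--
-- DOC_TYPE_MANUAL = "manual"
--
-- DOC_TYPE_DATASHEET = "datasheet"
--
-- DOC_TYPE_FAILURE_REPORT = "equipment_failure_report"
--
-- _DOC_TYPE_PRIORITY = (
--     DOC_TYPE_FAILURE_REPORT,
--     DOC_TYPE_DATASHEET,
--     DOC_TYPE_MANUAL,
--     DOC_TYPE_CATALOG,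
-- )
--
-- _DOC_TYPE_PROMPT_GUIDE = {
--     DOC_TYPE_FAILURE_REPORT: (
--         "설비 장애 조치보고서 문서로 보고 고객사/대상설비/작업일/작업내용/작성자/작업장소를 우선 추출해 요약하라."
--     ),
--     DOC_TYPE_CATALOG: "카탈로그 문서로 보고 제품군 라인업, 대표 특징, 적용 용도를 중심으로 요약하라.",
--     DOC_TYPE_MANUAL: "설명서 문서로 보고 사용 목적, 핵심 절차, 주의사항/제약을 중심으로 요약하라.",
--     DOC_TYPE_DATASHEET: "데이터시트 문서로 보고 모델군과 핵심 사양(성능/인터페이스/정격)을 중심으로 요약하라.",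
-- }
--
-- def _normalize_document_type_token(value: str) -> str:
--     token = (value or "").strip().lower()
--     alias_map = {
--         "failure_report": DOC_TYPE_FAILURE_REPORT,
--         "incident_report": DOC_TYPE_FAILURE_REPORT,
--         "trouble_report": DOC_TYPE_FAILURE_REPORT,
--         "equipment_incident_report": DOC_TYPE_FAILURE_REPORT,
--         "catalogue": DOC_TYPE_CATALOG,
--         "brochure": DOC_TYPE_CATALOG,
--         "guide": DOC_TYPE_MANUAL,
--         "user_guide": DOC_TYPE_MANUAL,
--         "instructions": DOC_TYPE_MANUAL,
--         "spec": DOC_TYPE_DATASHEET,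
--         "specs": DOC_TYPE_DATASHEET,
--         "data_sheet": DOC_TYPE_DATASHEET,
--     }
--     return alias_map.get(token, token)
--
-- def _normalize_document_types(document_types: Sequence[str] | None) -> list[str]:
--     if not document_types:
--         return []
--     output: list[str] = []
--     seen = set()
--     for item in document_types:
--         token = _normalize_document_type_token(str(item))
--         if token not in _DOC_TYPE_PRIORITY:
--             continue
--         if token in seen:
--             continue
--         seen.add(token)
--         output.append(token)
--     output.sort(key=lambda value: _DOC_TYPE_PRIORITY.index(value))
--     return output
--
-- def _document_type_prompt_guidance(document_types: Sequence[str] | None) -> str: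
--     normalized = _normalize_document_types(document_types)
--     if not normalized:
--         return ""
--
--     labels = ", ".join(normalized)
--     lines = [f"[문서 타입 힌트]\n{labels}"]
--     lines.extend(_DOC_TYPE_PROMPT_GUIDE[item] for item in normalized if item in _DOC_TYPE_PROMPT_GUIDE)
--     return "\n".join(lines)
-- ===== SOURCE B (Python) =====
-- _FR_GUIDE = (
--     "설비 장애 조치보고서 문서로 보고 고객사/대상설비/작업일/작업내용/작성자/작업장소를 우선 추출해 요약하라."
-- )
-- _CAT_GUIDE = "카탈로그 문서로 보고 제품군 라인업, 대표 특징, 적용 용도를 중심으로 요약하라."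
-- _MAN_GUIDE = "설명서 문서로 보고 사용 목적, 핵심 절차, 주의사항/제약을 중심으로 요약하라."
-- _DS_GUIDE = "데이터시트 문서로 보고 모델군과 핵심 사양(성능/인터페이스/정격)을 중심으로 요약하라."
--
-- # Every accepted spelling (canonical names and aliases alike) mapped straight to
-- # one bit of a 4-bit mask, one bit per document type in priority order.
-- _TOKEN_BIT = {
--     "equipment_failure_report": 1,
--     "failure_report": 1,
--     "incident_report": 1,
--     "trouble_report": 1,
--     "equipment_incident_report": 1,
--     "datasheet": 2,
--     "spec": 2,
--     "specs": 2,
--     "data_sheet": 2,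
--     "manual": 4,
--     "guide": 4,
--     "user_guide": 4,
--     "instructions": 4,
--     "catalog": 8,
--     "catalogue": 8,
--     "brochure": 8,
-- }
--
-- _SLOTS = (
--     (1, "equipment_failure_report", _FR_GUIDE),
--     (2, "datasheet", _DS_GUIDE),
--     (4, "manual", _MAN_GUIDE),
--     (8, "catalog", _CAT_GUIDE),
-- )
--
--
-- def _document_type_prompt_guidance(document_types):
--     # Accumulate the recognized types as a 4-bit mask (dedup = bitwise OR),
--     # then emit the text directly from the mask, slot by slot: no list of
--     # tokens, no seen-set, no sort, no join.
--     mask = 0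
--     for item in document_types or ():
--         mask |= _TOKEN_BIT.get(str(item).strip().lower(), 0)
--     if not mask:
--         return ""
--     labels = ""
--     guides = ""
--     for bit, name, guide in _SLOTS:
--         if mask & bit:
--             labels = name if not labels else labels + ", " + name
--             guides += "\n" + guide
--     return "[문서 타입 힌트]\n" + labels + guides
-- ===== Notes on version B (the rewrite author's own statement) =====
-- stated objective: faster
-- what changed: B accumulates the recognized document types as a 4-bit integer mask via one direct table lookup and bitwise OR per item (dedup = OR idempotence), then renders the output string slot by slot from the mask, replacing A's normalize-to-list + seen-set + sort(key=priority.index) + two joins pipeline.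
import Mathlib
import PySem

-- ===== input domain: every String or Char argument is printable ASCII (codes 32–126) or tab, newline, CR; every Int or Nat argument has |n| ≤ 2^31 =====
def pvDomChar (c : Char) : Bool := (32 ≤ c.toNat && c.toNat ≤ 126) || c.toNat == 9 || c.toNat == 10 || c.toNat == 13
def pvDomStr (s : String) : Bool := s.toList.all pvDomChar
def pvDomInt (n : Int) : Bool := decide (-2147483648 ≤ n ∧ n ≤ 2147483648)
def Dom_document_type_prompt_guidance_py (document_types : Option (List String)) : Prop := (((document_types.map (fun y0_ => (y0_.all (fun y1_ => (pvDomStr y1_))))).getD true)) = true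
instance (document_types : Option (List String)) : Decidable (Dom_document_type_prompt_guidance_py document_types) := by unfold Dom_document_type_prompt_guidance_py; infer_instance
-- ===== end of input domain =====

-- B replaces A's normalize-to-list/seen-set/sort(key=priority.index)/join pipeline by a 4-bit
-- integer mask accumulated with one table lookup + bitwise OR per item, then a direct slot-by-slot
-- string rendering from the mask (objective: alternative).

-- ===== PORT A =====
-- module constants of A (dict literals with distinct keys, as PySem.Dict.mk)
def pvPriority : List String :=
  ["equipment_failure_report", "datasheet", "manual", "catalog"]

def pvGuide : PySem.Dict String String := PySem.Dict.mk
  [("equipment_failure_report", "설비 장애 조치보고서 문서로 보고 고객사/대상설비/작업일/작업내용/작성자/작업장소를 우선 추출해 요약하라."),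
   ("catalog", "카탈로그 문서로 보고 제품군 라인업, 대표 특징, 적용 용도를 중심으로 요약하라."),
   ("manual", "설명서 문서로 보고 사용 목적, 핵심 절차, 주의사항/제약을 중심으로 요약하라."),
   ("datasheet", "데이터시트 문서로 보고 모델군과 핵심 사양(성능/인터페이스/정격)을 중심으로 요약하라.")]

def pvAliasMap : PySem.Dict String String := PySem.Dict.mk
  [("failure_report", "equipment_failure_report"),
   ("incident_report", "equipment_failure_report"),
   ("trouble_report", "equipment_failure_report"),
   ("equipment_incident_report", "equipment_failure_report"),
   ("catalogue", "catalog"),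
   ("brochure", "catalog"),
   ("guide", "manual"),
   ("user_guide", "manual"),
   ("instructions", "manual"),
   ("spec", "datasheet"),
   ("specs", "datasheet"),
   ("data_sheet", "datasheet")]

-- _normalize_document_type_token; '(value or "")' is the identity here since strip("") = ""
def pvNormToken (value : String) : String :=
  let token := PySem.Str.lower (PySem.Str.strip value)
  PySem.Dict.getD pvAliasMap token token

-- body of A's normalization loop: state (output, seen)
def pvStepA (st : List String × PySem.Set String) (item : String) : List String × PySem.Set String :=
  let token := pvNormToken item
  if token ∉ pvPriority then st
  else if PySem.Set.contains st.2 token then st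
  else (st.1 ++ [token], PySem.Set.add st.2 token)

-- _normalize_document_types: loop, then output.sort(key=priority.index).
-- index never misses (every appended token ∈ pvPriority), so the literal '.getD 0' is inert.
def pvNormalizeA (document_types : Option (List String)) : List String :=
  match document_types with
  | none => []
  | some l =>
    if l = [] then []
    else
      let st := l.foldl pvStepA ([], PySem.Set.empty)
      PySem.List.sorted st.1 (fun v => ((PySem.List.index? pvPriority v).getD 0 : Nat)) false

def document_type_prompt_guidance_py (document_types : Option (List String)) : String :=
  let normalized := pvNormalizeA document_types
  if normalized = [] then ""
  else
    let labels := PySem.Str.join ", " normalized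
    let lines := ["[문서 타입 힌트]\n" ++ labels]
      ++ normalized.filterMap (fun item => PySem.Dict.get? pvGuide item)
    PySem.Str.join "\n" lines

-- ===== PORT B =====
-- B's tables: every accepted spelling mapped straight to one bit of a 4-bit mask
-- (the mask is a small nonnegative Python int, so Nat is exact here)
def pvTokenBit : PySem.Dict String Nat := PySem.Dict.mk
  [("equipment_failure_report", 1),
   ("failure_report", 1),
   ("incident_report", 1),
   ("trouble_report", 1),
   ("equipment_incident_report", 1),
   ("datasheet", 2),
   ("spec", 2),
   ("specs", 2),
   ("data_sheet", 2),
   ("manual", 4),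
   ("guide", 4),
   ("user_guide", 4),
   ("instructions", 4),
   ("catalog", 8),
   ("catalogue", 8),
   ("brochure", 8)]

def pvSlots : List (Nat × String × String) :=
  [(1, "equipment_failure_report", "설비 장애 조치보고서 문서로 보고 고객사/대상설비/작업일/작업내용/작성자/작업장소를 우선 추출해 요약하라."),
   (2, "datasheet", "데이터시트 문서로 보고 모델군과 핵심 사양(성능/인터페이스/정격)을 중심으로 요약하라."),
   (4, "manual", "설명서 문서로 보고 사용 목적, 핵심 절차, 주의사항/제약을 중심으로 요약하라."),
   (8, "catalog", "카탈로그 문서로 보고 제품군 라인업, 대표 특징, 적용 용도를 중심으로 요약하라.")]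

-- mask |= _TOKEN_BIT.get(str(item).strip().lower(), 0)
def pvMaskStep (mask : Nat) (item : String) : Nat :=
  mask ||| PySem.Dict.getD pvTokenBit (PySem.Str.lower (PySem.Str.strip item)) 0

def document_type_prompt_guidance_py_alt (document_types : Option (List String)) : String :=
  let mask := (document_types.getD []).foldl pvMaskStep 0
  if mask = 0 then ""
  else
    let r := pvSlots.foldl
      (fun (st : String × String) slot =>
        if mask &&& slot.1 ≠ 0 then
          ((if st.1 = "" then slot.2.1 else st.1 ++ ", " ++ slot.2.1),
           st.2 ++ "\n" ++ slot.2.2)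
        else st) ("", "")
    "[문서 타입 힌트]\n" ++ r.1 ++ r.2

-- ===== PRECONDITION & SPEC =====
def Spec_document_type_prompt_guidance_py (document_types : Option (List String)) (out : String) : Prop := out = document_type_prompt_guidance_py_alt document_types
instance (document_types : Option (List String)) (out : String) : Decidable (Spec_document_type_prompt_guidance_py document_types out) := by unfold Spec_document_type_prompt_guidance_py; infer_instance

-- ===== CLAIM (what is proved, stated in full; the proofs are below) =====
def Claim_equal_document_type_prompt_guidance_py : Prop := ∀ (document_types : Option (List String)), Dom_document_type_prompt_guidance_py document_types → Spec_document_type_prompt_guidance_py document_types (document_type_prompt_guidance_py document_types)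

-- ===== LEMMAS AND PROOFS =====

-- proof-side bridge: A's loop as a plain set fold (only the 'seen' evolution matters)
def pvStepS (s : PySem.Set String) (item : String) : PySem.Set String :=
  let token := pvNormToken item
  if token ∈ pvPriority then PySem.Set.add s token else s

-- A's loop keeps 'seen' = the set fold; its output list holds exactly the seen priority tokens
theorem pv_loop_inv (l : List String) (out : List String) (s : PySem.Set String)
    (hnd : out.Nodup) (hmem : ∀ x, x ∈ out ↔ x ∈ s) (hsub : ∀ x ∈ out, x ∈ pvPriority) :
    (l.foldl pvStepA (out, s)).2 = l.foldl pvStepS s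
    ∧ (l.foldl pvStepA (out, s)).1.Nodup
    ∧ (∀ x, x ∈ (l.foldl pvStepA (out, s)).1 ↔ x ∈ l.foldl pvStepS s)
    ∧ (∀ x ∈ (l.foldl pvStepA (out, s)).1, x ∈ pvPriority) := by
  induction l generalizing out s with
  | nil => exact ⟨rfl, hnd, hmem, hsub⟩
  | cons item rest ih =>
    simp only [List.foldl_cons]
    by_cases hp : pvNormToken item ∈ pvPriority
    · by_cases hseen : PySem.Set.contains s (pvNormToken item) = true
      · have hms : pvNormToken item ∈ s := (PySem.Set.contains_iff s _).mp hseen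
        have hA : pvStepA (out, s) item = (out, s) := by
          simp [pvStepA, hp, hms]
        have hB : pvStepS s item = s := by
          simp [pvStepS, hp, PySem.Set.add, hms]
        rw [hA, hB]
        exact ih out s hnd hmem hsub
      · have hns : pvNormToken item ∉ s := fun hm =>
          hseen ((PySem.Set.contains_iff s _).mpr hm)
        have hnotmem : pvNormToken item ∉ out := fun h => hns ((hmem _).mp h)
        have hA : pvStepA (out, s) item
            = (out ++ [pvNormToken item], PySem.Set.add s (pvNormToken item)) := by
          simp [pvStepA, hp, hns]
        have hB : pvStepS s item = PySem.Set.add s (pvNormToken item) := by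
          simp [pvStepS, hp]
        rw [hA, hB]
        refine ih (out ++ [pvNormToken item]) (PySem.Set.add s (pvNormToken item)) ?_ ?_ ?_
        · rw [List.nodup_append]
          refine ⟨hnd, List.nodup_singleton _, fun a ha b hb => ?_⟩
          rw [List.mem_singleton] at hb
          exact fun h => hnotmem (hb ▸ h ▸ ha)
        · intro x
          simp only [List.mem_append, List.mem_singleton, PySem.Set.mem_add, hmem]
        · intro x hx
          rcases List.mem_append.mp hx with h | h
          · exact hsub x h
          · simpa [List.mem_singleton.mp h] using hp
    · have hA : pvStepA (out, s) item = (out, s) := by simp [pvStepA, hp]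
      have hB : pvStepS s item = s := by simp [pvStepS, hp]
      rw [hA, hB]
      exact ih out s hnd hmem hsub

-- a nodup list of priority tokens, sorted by priority index, is the priority filter
theorem pv_sorted_eq_filter (out : List String) (hnd : out.Nodup)
    (hsub : ∀ x ∈ out, x ∈ pvPriority) :
    PySem.List.sorted out (fun v => ((PySem.List.index? pvPriority v).getD 0 : Nat)) false
      = pvPriority.filter (fun t => t ∈ out) := by
  apply PySem.List.sorted_eq_of_perm_of_pairwise_lt
  · rw [List.perm_ext_iff_of_nodup (List.Nodup.filter _ (by decide)) hnd]
    intro a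
    simp only [List.mem_filter, decide_eq_true_eq]
    exact ⟨fun h => h.2, fun h => ⟨hsub a h, h⟩⟩
  · have hpw : pvPriority.Pairwise
        (fun a b => ((PySem.List.index? pvPriority a).getD 0 : Nat)
                  < ((PySem.List.index? pvPriority b).getD 0 : Nat)) := by decide
    exact hpw.sublist (List.filter_sublist ..)

-- A's normalized list is the priority filter of the set fold's membership
theorem pv_normalized_eq (document_types : Option (List String)) :
    pvNormalizeA document_types
      = pvPriority.filter (fun t => PySem.Set.contains
          ((document_types.getD []).foldl pvStepS PySem.Set.empty) t) := by
  have key : ∀ l : List String,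
      PySem.List.sorted (l.foldl pvStepA ([], PySem.Set.empty)).1
        (fun v => ((PySem.List.index? pvPriority v).getD 0 : Nat)) false
      = pvPriority.filter (fun t => PySem.Set.contains (l.foldl pvStepS PySem.Set.empty) t) := by
    intro l
    obtain ⟨heq, hnd, hmem, hsub⟩ := pv_loop_inv l [] PySem.Set.empty
      List.nodup_nil (by simp [PySem.Set.empty]) (by simp)
    rw [pv_sorted_eq_filter _ hnd hsub]
    apply List.filter_congr
    intro t _
    cases hc : PySem.Set.contains (l.foldl pvStepS PySem.Set.empty) t with
    | false =>
      have hni : t ∉ l.foldl pvStepS PySem.Set.empty := by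
        intro hm
        have hct := (PySem.Set.contains_iff (l.foldl pvStepS PySem.Set.empty) t).mpr hm
        rw [hc] at hct
        exact Bool.false_ne_true hct
      simpa using fun hm => hni ((hmem t).mp hm)
    | true =>
      simpa using (hmem t).mpr ((PySem.Set.contains_iff _ _).mp hc)
  match document_types with
  | none =>
    simp [pvNormalizeA]
  | some l =>
    by_cases hl : l = []
    · subst hl; simp [pvNormalizeA]
    · simpa [pvNormalizeA, hl] using key l

-- four membership booleans, and the 4-bit mask / ordered list they encode
def pvG (b0 b1 b2 b3 : Bool) : Nat :=
  (if b0 then 1 else 0) + (if b1 then 2 else 0) + (if b2 then 4 else 0) + (if b3 then 8 else 0)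

def pvGOf (s : PySem.Set String) : Nat :=
  pvG (PySem.Set.contains s "equipment_failure_report")
      (PySem.Set.contains s "datasheet")
      (PySem.Set.contains s "manual")
      (PySem.Set.contains s "catalog")

def pvListOf (b0 b1 b2 b3 : Bool) : List String :=
  (if b0 then ["equipment_failure_report"] else []) ++ (if b1 then ["datasheet"] else [])
    ++ (if b2 then ["manual"] else []) ++ (if b3 then ["catalog"] else [])

-- the two final renderings, as functions of the loop results (defeq to the ports' bodies)
def pvRenderA (normalized : List String) : String :=
  if normalized = [] then ""
  else PySem.Str.join "\n" (["[문서 타입 힌트]\n" ++ PySem.Str.join ", " normalized]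
    ++ normalized.filterMap (fun item => PySem.Dict.get? pvGuide item))

def pvRenderB (mask : Nat) : String :=
  if mask = 0 then ""
  else
    let r := pvSlots.foldl
      (fun (st : String × String) slot =>
        if mask &&& slot.1 ≠ 0 then
          ((if st.1 = "" then slot.2.1 else st.1 ++ ", " ++ slot.2.1),
           st.2 ++ "\n" ++ slot.2.2)
        else st) ("", "")
    "[문서 타입 힌트]\n" ++ r.1 ++ r.2

-- B's token→bit table is A's alias map followed by the priority-position bit
def pvBitOf (n : String) : Nat :=
  if n = "equipment_failure_report" then 1
  else if n = "datasheet" then 2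
  else if n = "manual" then 4
  else if n = "catalog" then 8
  else 0

theorem pv_bit_of_token (t : String) :
    PySem.Dict.getD pvTokenBit t 0 = pvBitOf (PySem.Dict.getD pvAliasMap t t) := by
  by_cases h0 : "equipment_failure_report" = t
  · subst h0; decide
  by_cases h1 : "failure_report" = t
  · subst h1; decide
  by_cases h2 : "incident_report" = t
  · subst h2; decide
  by_cases h3 : "trouble_report" = t
  · subst h3; decide
  by_cases h4 : "equipment_incident_report" = t
  · subst h4; decide
  by_cases h5 : "datasheet" = t
  · subst h5; decide
  by_cases h6 : "spec" = t
  · subst h6; decide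
  by_cases h7 : "specs" = t
  · subst h7; decide
  by_cases h8 : "data_sheet" = t
  · subst h8; decide
  by_cases h9 : "manual" = t
  · subst h9; decide
  by_cases h10 : "guide" = t
  · subst h10; decide
  by_cases h11 : "user_guide" = t
  · subst h11; decide
  by_cases h12 : "instructions" = t
  · subst h12; decide
  by_cases h13 : "catalog" = t
  · subst h13; decide
  by_cases h14 : "catalogue" = t
  · subst h14; decide
  by_cases h15 : "brochure" = t
  · subst h15; decide
  have e0 := beq_eq_false_iff_ne.mpr h0
  have e1 := beq_eq_false_iff_ne.mpr h1
  have e2 := beq_eq_false_iff_ne.mpr h2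
  have e3 := beq_eq_false_iff_ne.mpr h3
  have e4 := beq_eq_false_iff_ne.mpr h4
  have e5 := beq_eq_false_iff_ne.mpr h5
  have e6 := beq_eq_false_iff_ne.mpr h6
  have e7 := beq_eq_false_iff_ne.mpr h7
  have e8 := beq_eq_false_iff_ne.mpr h8
  have e9 := beq_eq_false_iff_ne.mpr h9
  have e10 := beq_eq_false_iff_ne.mpr h10
  have e11 := beq_eq_false_iff_ne.mpr h11
  have e12 := beq_eq_false_iff_ne.mpr h12
  have e13 := beq_eq_false_iff_ne.mpr h13
  have e14 := beq_eq_false_iff_ne.mpr h14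
  have e15 := beq_eq_false_iff_ne.mpr h15
  have n0 : ¬ t = "equipment_failure_report" := fun he => h0 he.symm
  have n5 : ¬ t = "datasheet" := fun he => h5 he.symm
  have n9 : ¬ t = "manual" := fun he => h9 he.symm
  have n13 : ¬ t = "catalog" := fun he => h13 he.symm
  simp [n0, n5, n9, n13, pvTokenBit, pvAliasMap, pvBitOf, PySem.Dict.getD, PySem.Dict.get?,
    List.find?, e0, e1, e2, e3, e4, e5, e6, e7, e8, e9, e10, e11, e12, e13, e14, e15]

theorem pv_g_or1 : ∀ b0 b1 b2 b3 : Bool, pvG b0 b1 b2 b3 ||| 1 = pvG true b1 b2 b3 := by decide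
theorem pv_g_or2 : ∀ b0 b1 b2 b3 : Bool, pvG b0 b1 b2 b3 ||| 2 = pvG b0 true b2 b3 := by decide
theorem pv_g_or4 : ∀ b0 b1 b2 b3 : Bool, pvG b0 b1 b2 b3 ||| 4 = pvG b0 b1 true b3 := by decide
theorem pv_g_or8 : ∀ b0 b1 b2 b3 : Bool, pvG b0 b1 b2 b3 ||| 8 = pvG b0 b1 b2 true := by decide

-- one step: OR-ing the token's bit tracks adding the normalized token to the seen set
theorem pv_mask_step (s : PySem.Set String) (item : String) :
    pvMaskStep (pvGOf s) item = pvGOf (pvStepS s item) := by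
  have htok : pvMaskStep (pvGOf s) item = pvGOf s ||| pvBitOf (pvNormToken item) := by
    rw [pvMaskStep, pv_bit_of_token]; rfl
  rw [htok]
  by_cases hp : pvNormToken item ∈ pvPriority
  · have hstep : pvStepS s item = PySem.Set.add s (pvNormToken item) := by
      simp [pvStepS, hp]
    rw [hstep]
    simp only [pvPriority, List.mem_cons, List.not_mem_nil, or_false] at hp
    rcases hp with h | h | h | h <;> rw [h] <;>
      simp [pvGOf, pvBitOf, pv_g_or1, pv_g_or2, pv_g_or4, pv_g_or8]
  · have hstep : pvStepS s item = s := by simp [pvStepS, hp]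
    have hbit : pvBitOf (pvNormToken item) = 0 := by
      simp only [pvPriority, List.mem_cons, List.not_mem_nil, or_false, not_or] at hp
      simp [pvBitOf, hp.1, hp.2.1, hp.2.2.1, hp.2.2.2]
    rw [hstep, hbit]
    simp

theorem pv_mask_fold (l : List String) (s : PySem.Set String) :
    l.foldl pvMaskStep (pvGOf s) = pvGOf (l.foldl pvStepS s) := by
  induction l generalizing s with
  | nil => rfl
  | cons item rest ih => rw [List.foldl_cons, pv_mask_step, List.foldl_cons, ih]

-- the priority filter, written out over the four membership booleans
theorem pv_filter_eq_listOf (s : PySem.Set String) :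
    pvPriority.filter (fun t => PySem.Set.contains s t)
      = pvListOf (PySem.Set.contains s "equipment_failure_report")
          (PySem.Set.contains s "datasheet")
          (PySem.Set.contains s "manual")
          (PySem.Set.contains s "catalog") := by
  cases h0 : PySem.Set.contains s "equipment_failure_report" <;>
  cases h1 : PySem.Set.contains s "datasheet" <;>
  cases h2 : PySem.Set.contains s "manual" <;>
  cases h3 : PySem.Set.contains s "catalog" <;>
  · rw [show pvPriority = ["equipment_failure_report", "datasheet", "manual", "catalog"] from rfl]
    simp only [List.filter, h0, h1, h2, h3]
    simp [pvListOf]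

-- on each of the 16 possible masks both renderings produce the same string
set_option maxRecDepth 100000 in
set_option maxHeartbeats 4000000 in
theorem pv_render16 : ∀ b0 b1 b2 b3 : Bool,
    pvRenderA (pvListOf b0 b1 b2 b3) = pvRenderB (pvG b0 b1 b2 b3) := by decide

-- ===== VERDICT (by name: the statement is the Claim_ definition above) =====
set_option maxHeartbeats 2000000 in
theorem document_type_prompt_guidance_py_spec : Claim_equal_document_type_prompt_guidance_py := by
  intro document_types _
  show document_type_prompt_guidance_py document_types
      = document_type_prompt_guidance_py_alt document_types
  have hA : document_type_prompt_guidance_py document_types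
      = pvRenderA (pvNormalizeA document_types) := rfl
  have hB : document_type_prompt_guidance_py_alt document_types
      = pvRenderB ((document_types.getD []).foldl pvMaskStep 0) := rfl
  have h0 : (0 : Nat) = pvGOf PySem.Set.empty := by decide
  rw [hA, hB, pv_normalized_eq, h0, pv_mask_fold, pv_filter_eq_listOf]
  exact pv_render16 _ _ _ _
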